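-- pv_equiv track=rewrite | github.com/catelizabethmurphy/slack-bot | get_new_rules.py | build_digest_rows
-- ===== SOURCE A (Python) =====
-- from collections import defaultdict
--
-- def parse_document_type(raw_value):
--     doc_type = (raw_value or "").strip().lower()
--
--     if "proposed" in doc_type and "rule" in doc_type:
--         return "proposed"
--
--     if "rule" in doc_type:
--         return "final"
--
--     return None
--
-- def document_agency(attributes):
--     agency_name = attributes.get("agencyName")
--     if agency_name:
--         return agency_name
--
--     agency_id = attributes.get("agencyId")
--     if agency_id:
--         return agency_id
--
--     agency_ids = attributes.get("agencyIds")
--     if isinstance(agency_ids, list) and agency_ids: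
--         return str(agency_ids[0])
--
--     return "Unknown Agency"
--
-- def build_digest_rows(documents):
--     proposed_count = 0
--     final_count = 0
--     agencies = defaultdict(lambda: {"proposed": 0, "final": 0})
--
--     for item in documents:
--         attributes = item.get("attributes", {})
--         if not isinstance(attributes, dict):
--             continue
--
--         category = parse_document_type(attributes.get("documentType"))
--         if category is None:
--             continue
--
--         if category == "proposed":
--             proposed_count += 1
--         else:
--             final_count += 1
--
--         agency = document_agency(attributes)
--         agencies[agency][category] += 1
--
--     return proposed_count, final_count, agencies
-- ===== SOURCE B (Python) =====
-- from collections import defaultdict, Counter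
--
-- def parse_document_type(raw_value):
--     doc_type = (raw_value or "").strip().lower()
--
--     if "proposed" in doc_type and "rule" in doc_type:
--         return "proposed"
--
--     if "rule" in doc_type:
--         return "final"
--
--     return None
--
-- def document_agency(attributes):
--     agency_name = attributes.get("agencyName")
--     if agency_name:
--         return agency_name
--
--     agency_id = attributes.get("agencyId")
--     if agency_id:
--         return agency_id
--
--     agency_ids = attributes.get("agencyIds")
--     if isinstance(agency_ids, list) and agency_ids:
--         return str(agency_ids[0])
--
--     return "Unknown Agency"
--
-- def _classify(item):
--     attributes = item.get("attributes", {})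
--     if not isinstance(attributes, dict):
--         return None
--     category = parse_document_type(attributes.get("documentType"))
--     if category is None:
--         return None
--     return document_agency(attributes), category
--
-- def build_digest_rows(documents):
--     pairs = [p for p in map(_classify, documents) if p is not None]
--     counts = Counter(pairs)
--     agencies = defaultdict(lambda: {"proposed": 0, "final": 0})
--     for agency in dict.fromkeys(a for a, _ in pairs):
--         agencies[agency] = {"proposed": counts[(agency, "proposed")],
--                             "final": counts[(agency, "final")]}
--     proposed_count = sum(1 for _, c in pairs if c == "proposed")
--     final_count = sum(1 for _, c in pairs if c == "final")
--     return proposed_count, final_count, agencies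
-- ===== Notes on version B (the rewrite author's own statement) =====
-- stated objective: alternative
-- what changed: Replaces A's single loop that mutates two inline counters and a nested defaultdict with a collect-then-aggregate pipeline: extract (agency, category) pairs, tally them with one Counter, rebuild the per-agency table in first-occurrence key order, and derive the two totals by summation over the pairs.
import Mathlib
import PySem

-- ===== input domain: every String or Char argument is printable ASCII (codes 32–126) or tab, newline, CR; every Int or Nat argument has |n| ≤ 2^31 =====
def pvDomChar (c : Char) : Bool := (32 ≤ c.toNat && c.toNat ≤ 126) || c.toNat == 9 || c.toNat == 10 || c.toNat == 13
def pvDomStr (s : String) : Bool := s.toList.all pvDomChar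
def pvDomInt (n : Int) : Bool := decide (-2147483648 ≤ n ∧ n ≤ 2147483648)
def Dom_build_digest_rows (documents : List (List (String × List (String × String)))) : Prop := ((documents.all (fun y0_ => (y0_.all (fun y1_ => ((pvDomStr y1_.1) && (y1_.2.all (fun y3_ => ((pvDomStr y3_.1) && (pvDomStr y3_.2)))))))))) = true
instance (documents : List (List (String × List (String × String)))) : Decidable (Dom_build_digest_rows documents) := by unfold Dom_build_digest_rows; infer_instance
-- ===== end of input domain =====

-- B replaces A's single loop with three inline accumulators by a collect-then-aggregate
-- pipeline (pairs, Counter, rebuild table, sums); alternative decomposition, same cost.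

-- ===== PORT A =====
def pvParseDocumentType (raw_value : Option String) : Option String :=
  let doc_type := PySem.Str.lower (PySem.Str.strip (raw_value.getD ""))
  if PySem.Str.isIn "proposed" doc_type && PySem.Str.isIn "rule" doc_type then some "proposed"
  else if PySem.Str.isIn "rule" doc_type then some "final"
  else none

def pvTruthyStr : Option String → Bool
  | some s => s != ""
  | none => false

def pvDocumentAgency (attributes : PySem.Dict String String) : String :=
  let agency_name := attributes.get? "agencyName"
  if pvTruthyStr agency_name then agency_name.getD ""
  else
    let agency_id := attributes.get? "agencyId"
    if pvTruthyStr agency_id then agency_id.getD ""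
    else
      -- attributes values are str under the type convention, so
      -- isinstance(agency_ids, list) is always False: the branch never fires
      "Unknown Agency"

def pvDefaultRow : PySem.Dict String Int := PySem.Dict.mk [("proposed", 0), ("final", 0)]

def pvStepA (st : Int × Int × PySem.Dict String (PySem.Dict String Int))
    (item : List (String × List (String × String))) :
    Int × Int × PySem.Dict String (PySem.Dict String Int) :=
  let attributes := PySem.Dict.mk ((PySem.Dict.mk item).getD "attributes" [])
  -- isinstance(attributes, dict) is always True under the type convention
  match pvParseDocumentType (attributes.get? "documentType") with
  | none => st
  | some category =>
    let proposed_count := if category == "proposed" then st.1 + 1 else st.1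
    let final_count := if category == "proposed" then st.2.1 else st.2.1 + 1
    let agency := pvDocumentAgency attributes
    (proposed_count, final_count,
     st.2.2.modify agency pvDefaultRow (fun inner => inner.modify category 0 (· + 1)))

def build_digest_rows (documents : List (List (String × List (String × String)))) : Int × Int × (List (String × List (String × Int))) :=
  let st := documents.foldl pvStepA (0, 0, PySem.Dict.empty)
  (st.1, st.2.1, st.2.2.items.map (fun kv => (kv.1, kv.2.items)))

-- ===== PORT B =====
def pvClassify (item : List (String × List (String × String))) : Option (String × String) :=
  let attributes := PySem.Dict.mk ((PySem.Dict.mk item).getD "attributes" [])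
  match pvParseDocumentType (attributes.get? "documentType") with
  | none => none
  | some category => some (pvDocumentAgency attributes, category)

def build_digest_rows_alt (documents : List (List (String × List (String × String)))) : Int × Int × (List (String × List (String × Int))) :=
  -- [p for p in map(_classify, documents) if p is not None]: the map + is-not-None
  -- filter fused, which is exactly List.filterMap
  let pairs := documents.filterMap pvClassify
  let counts := PySem.Dict.counter pairs
  let keys := PySem.List.dedup (pairs.map Prod.fst)
  let agencies := keys.foldl
    (fun (d : PySem.Dict String (PySem.Dict String Int)) a =>
      d.insert a (PySem.Dict.mk [("proposed", counts.getD (a, "proposed") 0),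
                                 ("final", counts.getD (a, "final") 0)]))
    PySem.Dict.empty
  let proposed_count := pairs.foldl (fun n p => if p.2 == "proposed" then n + 1 else n) (0 : Int)
  let final_count := pairs.foldl (fun n p => if p.2 == "final" then n + 1 else n) (0 : Int)
  (proposed_count, final_count, agencies.items.map (fun kv => (kv.1, kv.2.items)))

-- ===== PRECONDITION & SPEC =====
def Spec_build_digest_rows (documents : List (List (String × List (String × String)))) (out : Int × Int × (List (String × List (String × Int)))) : Prop := out = build_digest_rows_alt documents
instance (documents : List (List (String × List (String × String)))) (out : Int × Int × (List (String × List (String × Int)))) : Decidable (Spec_build_digest_rows documents out) := by unfold Spec_build_digest_rows; infer_instance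

-- ===== CLAIM (what is proved, stated in full; the proofs are below) =====
def Claim_equal_build_digest_rows : Prop := ∀ (documents : List (List (String × List (String × String)))), Dom_build_digest_rows documents → Spec_build_digest_rows documents (build_digest_rows documents)

-- ===== LEMMAS AND PROOFS =====

-- the combined step over one classified pair, as A performs it
def pvStep2 (st : Int × Int × PySem.Dict String (PySem.Dict String Int)) (p : String × String) :
    Int × Int × PySem.Dict String (PySem.Dict String Int) :=
  ((if p.2 == "proposed" then st.1 + 1 else st.1),
   (if p.2 == "proposed" then st.2.1 else st.2.1 + 1),
   st.2.2.modify p.1 pvDefaultRow (fun inner => inner.modify p.2 0 (· + 1)))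

def pvG3 (d : PySem.Dict String (PySem.Dict String Int)) (p : String × String) :
    PySem.Dict String (PySem.Dict String Int) :=
  d.modify p.1 pvDefaultRow (fun inner => inner.modify p.2 0 (· + 1))

def pvRowStep (inner : PySem.Dict String Int) (c : String) : PySem.Dict String Int :=
  inner.modify c 0 (· + 1)

theorem cat_classify (item : List (String × List (String × String))) (a c : String)
    (h : pvClassify item = some (a, c)) : c = "proposed" ∨ c = "final" := by
  unfold pvClassify at h
  unfold pvParseDocumentType at h
  dsimp only at h
  split_ifs at h <;> simp_all

theorem hcat_pairs (documents : List (List (String × List (String × String)))) :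
    ∀ p ∈ documents.filterMap pvClassify, p.2 = "proposed" ∨ p.2 = "final" := by
  intro p hp
  rw [List.mem_filterMap] at hp
  obtain ⟨item, -, h⟩ := hp
  obtain ⟨a, c⟩ := p
  exact cat_classify item a c h

theorem stepA_eq (st : Int × Int × PySem.Dict String (PySem.Dict String Int))
    (item : List (String × List (String × String))) :
    pvStepA st item = (match pvClassify item with
      | none => st
      | some p => pvStep2 st p) := by
  unfold pvStepA pvClassify pvStep2
  cases h : pvParseDocumentType
      ((PySem.Dict.mk ((PySem.Dict.mk item).getD "attributes" [])).get? "documentType") <;>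
    simp [h]

theorem foldA_eq (documents : List (List (String × List (String × String))))
    (st : Int × Int × PySem.Dict String (PySem.Dict String Int)) :
    documents.foldl pvStepA st = (documents.filterMap pvClassify).foldl pvStep2 st := by
  induction documents generalizing st with
  | nil => rfl
  | cons d t ih =>
    simp only [List.foldl_cons, List.filterMap_cons]
    rw [stepA_eq]
    cases h : pvClassify d <;> simp [ih]

theorem proj1 (ps : List (String × String)) (st : Int × Int × PySem.Dict String (PySem.Dict String Int)) :
    (ps.foldl pvStep2 st).1 =
      ps.foldl (fun n p => if p.2 == "proposed" then n + 1 else n) st.1 := by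
  induction ps generalizing st with
  | nil => rfl
  | cons p t ih =>
    simp only [List.foldl_cons, ih, pvStep2]

theorem proj2 (ps : List (String × String)) (h : ∀ p ∈ ps, p.2 = "proposed" ∨ p.2 = "final")
    (st : Int × Int × PySem.Dict String (PySem.Dict String Int)) :
    (ps.foldl pvStep2 st).2.1 =
      ps.foldl (fun n p => if p.2 == "final" then n + 1 else n) st.2.1 := by
  induction ps generalizing st with
  | nil => rfl
  | cons p t ih =>
    have ih' := ih (fun q hq => h q (List.mem_cons_of_mem p hq))
    rw [List.foldl_cons, List.foldl_cons, ih']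
    rcases h p List.mem_cons_self with hp | hp <;> simp [pvStep2, hp]

theorem proj3 (ps : List (String × String)) (st : Int × Int × PySem.Dict String (PySem.Dict String Int)) :
    (ps.foldl pvStep2 st).2.2 = ps.foldl pvG3 st.2.2 := by
  induction ps generalizing st with
  | nil => rfl
  | cons p t ih =>
    simp only [List.foldl_cons, ih, pvStep2, pvG3]

theorem getD_g3 (ps : List (String × String)) (d : PySem.Dict String (PySem.Dict String Int)) (a : String) :
    (ps.foldl pvG3 d).getD a pvDefaultRow =
      ((ps.filter (fun p => p.1 == a)).map Prod.snd).foldl pvRowStep (d.getD a pvDefaultRow) := by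
  induction ps generalizing d with
  | nil => rfl
  | cons p t ih =>
    simp only [List.foldl_cons, List.filter_cons]
    by_cases hpa : p.1 = a
    · simp only [hpa, beq_self_eq_true, if_true, List.map_cons, List.foldl_cons, ih]
      congr 1
      show (d.modify p.1 pvDefaultRow (fun inner => inner.modify p.2 0 (· + 1))).getD a pvDefaultRow = _
      rw [hpa, PySem.Dict.getD_modify_self]
      rfl
    · have hb : (p.1 == a) = false := by simp [hpa]
      simp only [hb, ih]
      congr 1
      show (d.modify p.1 pvDefaultRow (fun inner => inner.modify p.2 0 (· + 1))).getD a pvDefaultRow = _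
      rw [PySem.Dict.getD_modify_of_ne _ _ _ (fun he => hpa he.symm)]

theorem row_fold (cs : List String) (h : ∀ c ∈ cs, c = "proposed" ∨ c = "final") (np nf : Int) :
    cs.foldl pvRowStep (PySem.Dict.mk [("proposed", np), ("final", nf)]) =
      PySem.Dict.mk [("proposed", np + cs.count "proposed"), ("final", nf + cs.count "final")] := by
  induction cs generalizing np nf with
  | nil => simp
  | cons c t ih =>
    rcases h c List.mem_cons_self with hc | hc <;> subst hc <;>
      rw [List.foldl_cons] <;>
      [ (have hs : pvRowStep (PySem.Dict.mk [("proposed", np), ("final", nf)]) "proposed" =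
            PySem.Dict.mk [("proposed", np + 1), ("final", nf)] := by
          simp [pvRowStep, PySem.Dict.modify, PySem.Dict.insert, PySem.Dict.getD, PySem.Dict.get?]);
        (have hs : pvRowStep (PySem.Dict.mk [("proposed", np), ("final", nf)]) "final" =
            PySem.Dict.mk [("proposed", np), ("final", nf + 1)] := by
          simp [pvRowStep, PySem.Dict.modify, PySem.Dict.insert, PySem.Dict.getD, PySem.Dict.get?])] <;>
      rw [hs, ih (fun c hc => h c (List.mem_cons_of_mem _ hc))] <;>
      simp <;> omega

theorem count_pair (ps : List (String × String)) (a c : String) :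
    ((ps.filter (fun p => p.1 == a)).map Prod.snd).count c = ps.count (a, c) := by
  induction ps with
  | nil => rfl
  | cons p t ih =>
    obtain ⟨x, y⟩ := p
    simp only [List.filter_cons, List.count_cons]
    by_cases hx : x = a
    · subst hx
      by_cases hy : y = c <;> simp [hy, ih, Prod.ext_iff]
    · simp [hx, ih, Prod.ext_iff]

-- ===== VERDICT (by name: the statement is the Claim_ definition above) =====
set_option maxHeartbeats 1000000 in
theorem build_digest_rows_spec : Claim_equal_build_digest_rows := by
  unfold Claim_equal_build_digest_rows
  intro documents _
  unfold Spec_build_digest_rows build_digest_rows build_digest_rows_alt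
  dsimp only
  rw [foldA_eq]
  set ps := documents.filterMap pvClassify with hps
  have hcat := hcat_pairs documents
  rw [← hps] at hcat
  -- the three components
  rw [proj1, proj2 ps hcat, proj3]
  dsimp only
  refine congrArg _ (congrArg _ ?_)
  -- third component: the agencies table
  have hD := PySem.Dict.keys_foldl_modify_key ps Prod.fst pvDefaultRow
      (fun _ p inner => inner.modify p.2 0 (· + 1)) PySem.Dict.empty
  have hkeys : (ps.foldl pvG3 PySem.Dict.empty).keys = PySem.List.dedup (ps.map Prod.fst) := hD
  have hnd : (ps.foldl pvG3 PySem.Dict.empty).keys.Nodup :=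
    PySem.Dict.nodup_keys_foldl_modify_key ps Prod.fst pvDefaultRow
      (fun _ p inner => inner.modify p.2 0 (· + 1)) PySem.Dict.empty (by simp)
  rw [PySem.Dict.items_eq_map_keys _ hnd pvDefaultRow, hkeys]
  have hfresh : ((PySem.List.dedup (ps.map Prod.fst)).foldl
      (fun (d : PySem.Dict String (PySem.Dict String Int)) a =>
        d.insert a (PySem.Dict.mk [("proposed", (PySem.Dict.counter ps).getD (a, "proposed") 0),
                                   ("final", (PySem.Dict.counter ps).getD (a, "final") 0)]))
      PySem.Dict.empty).items = [] ++ (PySem.List.dedup (ps.map Prod.fst)).map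
        (fun a => (a, PySem.Dict.mk [("proposed", (PySem.Dict.counter ps).getD (a, "proposed") 0),
                                     ("final", (PySem.Dict.counter ps).getD (a, "final") 0)])) :=
    PySem.Dict.items_foldl_insert_fresh _ id _ PySem.Dict.empty
      (fun a _ => PySem.Dict.contains_empty a) (by simp)
  rw [hfresh]
  simp only [List.nil_append, List.map_map]
  apply List.map_congr_left
  intro k _
  have hrow : (ps.foldl pvG3 PySem.Dict.empty).getD k pvDefaultRow =
      PySem.Dict.mk [("proposed", (ps.count (k, "proposed") : Int)),
                     ("final", (ps.count (k, "final") : Int))] := by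
    rw [getD_g3]
    have hge : PySem.Dict.empty.getD k pvDefaultRow = pvDefaultRow := by simp
    rw [hge]
    have hcs : ∀ c ∈ (ps.filter (fun p => p.1 == k)).map Prod.snd,
        c = "proposed" ∨ c = "final" := by
      intro c hc
      rw [List.mem_map] at hc
      obtain ⟨p, hp, rfl⟩ := hc
      exact hcat p (List.mem_of_mem_filter hp)
    rw [show pvDefaultRow = PySem.Dict.mk [("proposed", (0:Int)), ("final", 0)] from rfl,
        row_fold _ hcs, count_pair, count_pair]
    simp
  simp only [Function.comp, hrow, PySem.Dict.getD_counter]
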